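-- pv_equiv track=rewrite | github.com/hamza-enes-balahoroglu/INF-211 | lectures/week_7/INF211_Project2_2425/INF211_Project2_240102002088.py | is_path_possible
-- ===== SOURCE A (Python) =====
-- GRID_SIZE = 6
--
-- def is_path_possible(obstacles):
--
--     start_pos = (0, 0) # (x, y)
--     target_pos = (GRID_SIZE - 1, GRID_SIZE - 1)
--
--     travel = []
--     checked = []
--
--     travel.append(start_pos)
--     checked.append(start_pos)
--
--     while len(travel) > 0:
--
--         current_x, current_y = travel.pop(0)
--
--         if (current_x, current_y) == target_pos:
--             return True  # Yol bulundu!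
--
--         for dx, dy in [(-1, 0), (1, 0), (0, -1), (0, 1)]:
--             next_x, next_y = current_x + dx, current_y + dy
--
--             next_pos = (next_x, next_y)
--
--             if 0 <= next_x < GRID_SIZE and 0 <= next_y < GRID_SIZE:
--
--                 if not (next_x, next_y) in obstacles:
--
--                     if next_pos not in checked:
--                         checked.append(next_pos)
--                         travel.append(next_pos)
--
--     # while döngüsü bittiyse ve 'True' dönmediysek,
--     # 'travel' listesi boşalmış demektir (gidilecek yer kalmadı).
--     # Yani yol tıkalı.
--     return False
-- ===== SOURCE B (Python) =====
-- GRID_SIZE = 6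
--
-- def is_path_possible(obstacles):
--     # Round-based fixed-point flood fill: no queue, expand the whole
--     # visited set each round until it stops growing.
--     target = (GRID_SIZE - 1, GRID_SIZE - 1)
--     visited = {(0, 0)}
--     while True:
--         nxt = {(x + dx, y + dy)
--                for (x, y) in visited
--                for (dx, dy) in ((-1, 0), (1, 0), (0, -1), (0, 1))
--                if 0 <= x + dx < GRID_SIZE and 0 <= y + dy < GRID_SIZE
--                and (x + dx, y + dy) not in obstacles}
--         if nxt <= visited:
--             return target in visited
--         visited |= nxt
-- ===== Notes on version B (the rewrite author's own statement) =====
-- stated objective: alternative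
-- what changed: Replaces the FIFO-queue BFS with per-node neighbor expansion and a separate 'checked' list by a queue-free round-based fixed-point flood fill: the whole visited set is expanded each round until it stops growing, then the target is tested for membership.
import Mathlib
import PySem

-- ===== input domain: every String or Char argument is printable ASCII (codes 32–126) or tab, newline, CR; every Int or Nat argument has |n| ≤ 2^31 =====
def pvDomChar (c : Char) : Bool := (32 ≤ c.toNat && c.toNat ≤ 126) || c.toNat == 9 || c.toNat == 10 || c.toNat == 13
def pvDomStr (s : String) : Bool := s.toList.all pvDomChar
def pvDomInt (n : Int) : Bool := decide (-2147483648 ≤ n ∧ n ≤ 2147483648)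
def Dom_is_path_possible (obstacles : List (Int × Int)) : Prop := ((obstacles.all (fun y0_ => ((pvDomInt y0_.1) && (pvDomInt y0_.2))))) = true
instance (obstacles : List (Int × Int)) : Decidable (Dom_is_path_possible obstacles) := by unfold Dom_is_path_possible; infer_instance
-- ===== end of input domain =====

-- B replaces A's FIFO-queue BFS by a queue-free round-based fixed-point flood fill (alternative decomposition; same asymptotic cost).

-- the four (dx, dy) moves, shared by both Pythons
def pvDeltas : List (Int × Int) := [(-1, 0), (1, 0), (0, -1), (0, 1)]

-- ===== PORT A =====
-- inner `for dx, dy in …` loop of A: tries each delta, appending newly discovered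
-- cells to both the queue (tc.1) and the checked list (tc.2), in A's test order
def pvBfsScan (obs : List (Int × Int)) (cx cy : Int) :
    List (Int × Int) → List (Int × Int) × List (Int × Int) → List (Int × Int) × List (Int × Int)
  | [], tc => tc
  | d :: ds, tc =>
    let nx := cx + d.1
    let ny := cy + d.2
    if 0 ≤ nx ∧ nx < 6 ∧ 0 ≤ ny ∧ ny < 6 then
      if (nx, ny) ∈ obs then pvBfsScan obs cx cy ds tc
      else if (nx, ny) ∈ tc.2 then pvBfsScan obs cx cy ds tc
      else pvBfsScan obs cx cy ds (tc.1 ++ [(nx, ny)], tc.2 ++ [(nx, ny)])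
    else pvBfsScan obs cx cy ds tc

-- A's `while len(travel) > 0` loop; fuel only makes the recursion total
-- (the loop runs at most 36 iterations, one per cell ever enqueued; 100 > 73 bound used in the proof)
def pvBfsLoop (obs : List (Int × Int)) :
    Nat → List (Int × Int) → List (Int × Int) → Bool
  | 0, _, _ => false
  | _ + 1, [], _ => false
  | fuel + 1, c :: rest, checked =>
    if c = (5, 5) then true
    else
      let tc := pvBfsScan obs c.1 c.2 pvDeltas (rest, checked)
      pvBfsLoop obs fuel tc.1 tc.2

def is_path_possible (obstacles : List (Int × Int)) : Bool :=
  pvBfsLoop obstacles 100 [(0, 0)] [(0, 0)]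

-- ===== PORT B =====
-- B's set comprehension: all in-bounds, non-obstacle neighbors of the visited set
def pvExpand (obs : List (Int × Int)) (visited : PySem.Set (Int × Int)) : PySem.Set (Int × Int) :=
  PySem.Set.ofList (visited.flatMap (fun p =>
    pvDeltas.filterMap (fun d =>
      let nx := p.1 + d.1
      let ny := p.2 + d.2
      if 0 ≤ nx ∧ nx < 6 ∧ 0 ≤ ny ∧ ny < 6 ∧ (nx, ny) ∉ obs then some (nx, ny) else none)))

-- B's `while True` loop; fuel only makes the recursion total (visited strictly grows
-- each round and has at most 36 elements, so at most 36 rounds; 100 > 37 bound used in the proof)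
def pvIterLoop (obs : List (Int × Int)) : Nat → PySem.Set (Int × Int) → Bool
  | 0, _ => false
  | fuel + 1, visited =>
    let nxt := pvExpand obs visited
    if PySem.Set.issubset nxt visited then decide ((5, 5) ∈ visited)
    else pvIterLoop obs fuel (PySem.Set.union visited nxt)

def is_path_possible_alt (obstacles : List (Int × Int)) : Bool :=
  pvIterLoop obstacles 100 (PySem.Set.ofList [(0, 0)])

-- ===== PRECONDITION & SPEC =====
def Spec_is_path_possible (obstacles : List (Int × Int)) (out : Bool) : Prop := out = is_path_possible_alt obstacles
instance (obstacles : List (Int × Int)) (out : Bool) : Decidable (Spec_is_path_possible obstacles out) := by unfold Spec_is_path_possible; infer_instance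

-- ===== CLAIM (what is proved, stated in full; the proofs are below) =====
def Claim_equal_is_path_possible : Prop := ∀ (obstacles : List (Int × Int)), Dom_is_path_possible obstacles → Spec_is_path_possible obstacles (is_path_possible obstacles)

-- ===== LEMMAS AND PROOFS =====

def pvInGrid (p : Int × Int) : Prop := 0 ≤ p.1 ∧ p.1 < 6 ∧ 0 ≤ p.2 ∧ p.2 < 6

def pvEdge (obs : List (Int × Int)) (p q : Int × Int) : Prop :=
  (∃ d ∈ pvDeltas, q = (p.1 + d.1, p.2 + d.2)) ∧ pvInGrid q ∧ q ∉ obs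

inductive pvReach (obs : List (Int × Int)) : (Int × Int) → (Int × Int) → Prop
  | refl (p : Int × Int) : pvReach obs p p
  | step {p q r : Int × Int} : pvReach obs p q → pvEdge obs q r → pvReach obs p r

theorem pvReach_trans {obs : List (Int × Int)} {p q r : Int × Int}
    (h1 : pvReach obs p q) (h2 : pvReach obs q r) : pvReach obs p r := by
  induction h2 with
  | refl => exact h1
  | step _ he ih => exact pvReach.step ih he

theorem pvReach_single {obs : List (Int × Int)} {p q : Int × Int}
    (h : pvEdge obs p q) : pvReach obs p q := pvReach.step (pvReach.refl p) h

def pvInts6 : List Int := [0, 1, 2, 3, 4, 5]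

def pvGridList : List (Int × Int) := pvInts6.flatMap (fun x => pvInts6.map (fun y => (x, y)))

theorem pvMem_gridList {p : Int × Int} (h : pvInGrid p) : p ∈ pvGridList := by
  obtain ⟨h1, h2, h3, h4⟩ := h
  have hx : p.1 ∈ pvInts6 := by simp only [pvInts6, List.mem_cons]; omega
  have hy : p.2 ∈ pvInts6 := by simp only [pvInts6, List.mem_cons]; omega
  exact List.mem_flatMap.mpr ⟨p.1, hx, List.mem_map.mpr ⟨p.2, hy, rfl⟩⟩

theorem pvLength_le_36 {l : List (Int × Int)} (hn : l.Nodup)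
    (hs : ∀ p ∈ l, pvInGrid p) : l.length ≤ 36 := by
  have : List.Subperm l pvGridList := List.subperm_of_subset hn (fun p hp => pvMem_gridList (hs p hp))
  have := this.length_le
  simpa [pvGridList] using this

-- invariant of A's BFS loop state
def pvInvA (obs travel checked : List (Int × Int)) : Prop :=
  checked.Nodup ∧
  (∀ p ∈ checked, pvInGrid p ∨ p = (0, 0)) ∧
  (∀ p ∈ travel, p ∈ checked) ∧
  ((5, 5) ∈ checked → (5, 5) ∈ travel) ∧
  (∀ p ∈ checked, p ∉ travel → ∀ q, pvEdge obs p q → q ∈ checked)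

theorem pvBfsScan_spec (obs : List (Int × Int)) (cx cy : Int) :
    ∀ (ds travel checked : List (Int × Int)), (∀ d ∈ ds, d ∈ pvDeltas) →
    ∃ Δ : List (Int × Int),
      pvBfsScan obs cx cy ds (travel, checked) = (travel ++ Δ, checked ++ Δ) ∧
      (∀ q ∈ Δ, pvEdge obs (cx, cy) q ∧ q ∉ checked) ∧
      (checked.Nodup → (checked ++ Δ).Nodup) ∧
      (∀ d ∈ ds, pvEdge obs (cx, cy) (cx + d.1, cy + d.2) → (cx + d.1, cy + d.2) ∈ checked ++ Δ) := by
  intro ds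
  induction ds with
  | nil =>
    intro travel checked _
    exact ⟨[], by simp [pvBfsScan], by simp, by simp, by simp⟩
  | cons d ds ih =>
    intro travel checked hds
    have hdmem : d ∈ pvDeltas := hds d (by simp)
    have hds' : ∀ d' ∈ ds, d' ∈ pvDeltas := fun d' h => hds d' (by simp [h])
    by_cases hb : 0 ≤ cx + d.1 ∧ cx + d.1 < 6 ∧ 0 ≤ cy + d.2 ∧ cy + d.2 < 6
    · by_cases ho : (cx + d.1, cy + d.2) ∈ obs
      · obtain ⟨Δ, he, hq, hn, hc⟩ := ih travel checked hds'
        refine ⟨Δ, ?_, hq, hn, ?_⟩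
        · simpa [pvBfsScan, hb, ho] using he
        · intro d' hd' hedge
          rcases List.mem_cons.mp hd' with rfl | hd'
          · exact absurd ho (fun h => hedge.2.2 h)
          · exact hc d' hd' hedge
      · by_cases hcm : (cx + d.1, cy + d.2) ∈ checked
        · obtain ⟨Δ, he, hq, hn, hc⟩ := ih travel checked hds'
          refine ⟨Δ, ?_, hq, hn, ?_⟩
          · simpa [pvBfsScan, hb, ho, hcm] using he
          · intro d' hd' hedge
            rcases List.mem_cons.mp hd' with rfl | hd'
            · exact List.mem_append_left _ hcm
            · exact hc d' hd' hedge
        · obtain ⟨Δ, he, hq, hn, hc⟩ :=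
            ih (travel ++ [(cx + d.1, cy + d.2)]) (checked ++ [(cx + d.1, cy + d.2)]) hds'
          have hedge0 : pvEdge obs (cx, cy) (cx + d.1, cy + d.2) :=
            ⟨⟨d, hdmem, rfl⟩, ⟨hb.1, hb.2.1, hb.2.2.1, hb.2.2.2⟩, ho⟩
          refine ⟨(cx + d.1, cy + d.2) :: Δ, ?_, ?_, ?_, ?_⟩
          · simpa [pvBfsScan, hb, ho, hcm, List.append_assoc] using he
          · intro q hqmem
            rcases List.mem_cons.mp hqmem with rfl | hqmem
            · exact ⟨hedge0, hcm⟩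
            · obtain ⟨he1, he2⟩ := hq q hqmem
              exact ⟨he1, fun h => he2 (List.mem_append_left _ h)⟩
          · intro hnod
            have hnod1 : (checked ++ [(cx + d.1, cy + d.2)]).Nodup := by
              rw [List.nodup_append]
              refine ⟨hnod, List.nodup_singleton _, ?_⟩
              intro a ha b hbm
              rw [List.mem_singleton] at hbm
              subst hbm
              rintro rfl
              exact hcm ha
            simpa [List.append_assoc] using hn hnod1
          · intro d' hd' hedge
            rcases List.mem_cons.mp hd' with rfl | hd'
            · simp
            · have := hc d' hd' hedge
              simpa using this
    · obtain ⟨Δ, he, hq, hn, hc⟩ := ih travel checked hds'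
      refine ⟨Δ, ?_, hq, hn, ?_⟩
      · simpa [pvBfsScan, hb] using he
      · intro d' hd' hedge
        rcases List.mem_cons.mp hd' with rfl | hd'
        · exact absurd ⟨hedge.2.1.1, hedge.2.1.2.1, hedge.2.1.2.2.1, hedge.2.1.2.2.2⟩ hb
        · exact hc d' hd' hedge

-- from a closed-except-for-frontier state, any reachable cell is already checked
-- or reachable from the frontier
theorem pvReach_escape {obs travel checked : List (Int × Int)}
    (hclos : ∀ p ∈ checked, p ∉ travel → ∀ q, pvEdge obs p q → q ∈ checked)
    {p t : Int × Int} (hr : pvReach obs p t) (hp : p ∈ checked) :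
    t ∈ checked ∨ ∃ s ∈ travel, pvReach obs s t := by
  induction hr with
  | refl => exact Or.inl hp
  | @step q r _ he ih =>
    rcases ih with hq | ⟨s, hs, hrs⟩
    · by_cases htr : q ∈ travel
      · exact Or.inr ⟨q, htr, pvReach_single he⟩
      · exact Or.inl (hclos q hq htr r he)
    · exact Or.inr ⟨s, hs, pvReach.step hrs he⟩

theorem pvInGrid_00 : pvInGrid (0, 0) := by simp [pvInGrid]

theorem pvChecked_le_36 {checked : List (Int × Int)} (hn : checked.Nodup)
    (hg : ∀ p ∈ checked, pvInGrid p ∨ p = (0, 0)) : checked.length ≤ 36 := by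
  refine pvLength_le_36 hn (fun p hp => ?_)
  rcases hg p hp with h | rfl
  · exact h
  · exact pvInGrid_00

theorem pvBfsLoop_main (obs : List (Int × Int)) :
    ∀ (fuel : Nat) (travel checked : List (Int × Int)),
      pvInvA obs travel checked →
      travel.length + 72 ≤ fuel + 2 * checked.length →
      (pvBfsLoop obs fuel travel checked = true ↔ ∃ s ∈ travel, pvReach obs s (5, 5)) := by
  intro fuel
  induction fuel with
  | zero =>
    intro travel checked hinv hfuel
    obtain ⟨hn, hg, _, _, _⟩ := hinv
    have h36 := pvChecked_le_36 hn hg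
    have : travel.length = 0 := by omega
    rw [List.length_eq_zero_iff] at this
    subst this
    simp [pvBfsLoop]
  | succ fuel ih =>
    intro travel checked hinv hfuel
    obtain ⟨hn, hg, htc, htgt, hclos⟩ := hinv
    rcases travel with _ | ⟨c, rest⟩
    · simp [pvBfsLoop]
    · by_cases hc : c = (5, 5)
      · subst hc
        have ht : pvBfsLoop obs (fuel + 1) ((5, 5) :: rest) checked = true := by
          simp [pvBfsLoop]
        rw [ht]
        exact iff_of_true rfl ⟨(5, 5), by simp, pvReach.refl _⟩
      · obtain ⟨Δ, he, hq, hnod, hcomp⟩ :=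
          pvBfsScan_spec obs c.1 c.2 pvDeltas rest checked (fun d h => h)
        have hcompq : ∀ q, pvEdge obs c q → q ∈ checked ++ Δ := by
          intro q hedge
          obtain ⟨hex, hgrid, hobs⟩ := hedge
          obtain ⟨d, hd, rfl⟩ := hex
          exact hcomp d hd ⟨⟨d, hd, rfl⟩, hgrid, hobs⟩
        have hloop : pvBfsLoop obs (fuel + 1) (c :: rest) checked
            = pvBfsLoop obs fuel (rest ++ Δ) (checked ++ Δ) := by
          simp only [pvBfsLoop, if_neg hc]
          rw [show pvBfsScan obs c.1 c.2 pvDeltas (rest, checked) = (rest ++ Δ, checked ++ Δ) from he]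
        -- new invariant
        have hΔedge : ∀ q ∈ Δ, pvEdge obs c q := fun q h => (hq q h).1
        have hinv' : pvInvA obs (rest ++ Δ) (checked ++ Δ) := by
          refine ⟨hnod hn, ?_, ?_, ?_, ?_⟩
          · intro p hp
            rcases List.mem_append.mp hp with hp | hp
            · exact hg p hp
            · exact Or.inl (hΔedge p hp).2.1
          · intro p hp
            rcases List.mem_append.mp hp with hp | hp
            · exact List.mem_append_left _ (htc p (by simp [hp]))
            · exact List.mem_append_right _ hp
          · intro h5
            rcases List.mem_append.mp h5 with h5 | h5
            · have := htgt h5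
              rcases List.mem_cons.mp this with h | h
              · exact absurd h.symm hc
              · exact List.mem_append_left _ h
            · exact List.mem_append_right _ h5
          · intro p hp hpt q hedge
            rcases List.mem_append.mp hp with hp | hp
            · by_cases hpc : p = c
              · subst hpc; exact hcompq q hedge
              · have hpnt : p ∉ c :: rest := by
                  intro h
                  rcases List.mem_cons.mp h with h | h
                  · exact hpc h
                  · exact hpt (List.mem_append_left _ h)
                exact List.mem_append_left _ (hclos p hp hpnt q hedge)
            · exact absurd (List.mem_append_right _ hp) hpt
        have hfuel' : (rest ++ Δ).length + 72 ≤ fuel + 2 * (checked ++ Δ).length := by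
          simp only [List.length_append]
          simp only [List.length_cons] at hfuel
          omega
        rw [hloop, ih (rest ++ Δ) (checked ++ Δ) hinv' hfuel']
        -- the reachability frontier is preserved
        constructor
        · rintro ⟨s, hs, hr⟩
          rcases List.mem_append.mp hs with hs | hs
          · exact ⟨s, by simp [hs], hr⟩
          · exact ⟨c, by simp, pvReach_trans (pvReach_single (hΔedge s hs)) hr⟩
        · rintro ⟨s, hs, hr⟩
          rcases List.mem_cons.mp hs with hsc | hs
          · -- s = c: escape through the new state
            have hcch : c ∈ checked ++ Δ := List.mem_append_left _ (htc c (by simp))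
            rw [hsc] at hr
            rcases pvReach_escape hinv'.2.2.2.2 hr hcch with h5 | ⟨s', hs', hr'⟩
            · have := hinv'.2.2.2.1 h5
              exact ⟨(5, 5), this, pvReach.refl _⟩
            · exact ⟨s', hs', hr'⟩
          · exact ⟨s, List.mem_append_left _ hs, hr⟩

-- characterization of B's expansion set
theorem pvMem_expand {obs : List (Int × Int)} {visited : PySem.Set (Int × Int)} {q : Int × Int} :
    q ∈ pvExpand obs visited ↔ ∃ p ∈ visited, pvEdge obs p q := by
  simp only [pvExpand, PySem.Set.mem_ofList, List.mem_flatMap, List.mem_filterMap]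
  constructor
  · rintro ⟨p, hp, d, hd, hopt⟩
    by_cases h : 0 ≤ p.1 + d.1 ∧ p.1 + d.1 < 6 ∧ 0 ≤ p.2 + d.2 ∧ p.2 + d.2 < 6 ∧
        (p.1 + d.1, p.2 + d.2) ∉ obs
    · rw [if_pos h] at hopt
      cases hopt
      exact ⟨p, hp, ⟨d, hd, rfl⟩, ⟨h.1, h.2.1, h.2.2.1, h.2.2.2.1⟩, h.2.2.2.2⟩
    · rw [if_neg h] at hopt
      cases hopt
  · rintro ⟨p, hp, ⟨d, hd, rfl⟩, hgrid, hobs⟩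
    refine ⟨p, hp, d, hd, ?_⟩
    rw [if_pos ⟨hgrid.1, hgrid.2.1, hgrid.2.2.1, hgrid.2.2.2, hobs⟩]

theorem pvReach_closed {obs : List (Int × Int)} {V : List (Int × Int)}
    (hclos : ∀ p ∈ V, ∀ q, pvEdge obs p q → q ∈ V)
    {s t : Int × Int} (hr : pvReach obs s t) (hs : s ∈ V) : t ∈ V := by
  induction hr with
  | refl => exact hs
  | step _ he ih => exact hclos _ ih _ he

theorem pvIterLoop_main (obs : List (Int × Int)) :
    ∀ (fuel : Nat) (visited : PySem.Set (Int × Int)),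
      visited.Nodup →
      (∀ p ∈ visited, pvInGrid p ∨ p = (0, 0)) →
      36 < fuel + visited.length →
      (pvIterLoop obs fuel visited = true ↔ ∃ s ∈ visited, pvReach obs s (5, 5)) := by
  intro fuel
  induction fuel with
  | zero =>
    intro visited hn hg hfuel
    have := pvChecked_le_36 hn hg
    omega
  | succ fuel ih =>
    intro visited hn hg hfuel
    by_cases hsub : PySem.Set.issubset (pvExpand obs visited) visited = true
    · have hclos : ∀ p ∈ visited, ∀ q, pvEdge obs p q → q ∈ visited := by
        intro p hp q hedge
        exact ((PySem.Set.issubset_iff _ _).mp hsub) q (pvMem_expand.mpr ⟨p, hp, hedge⟩)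
      simp only [pvIterLoop, hsub, if_true, decide_eq_true_eq]
      constructor
      · intro h5
        exact ⟨(5, 5), h5, pvReach.refl _⟩
      · rintro ⟨s, hs, hr⟩
        exact pvReach_closed hclos hr hs
    · have hnotsub : ∃ q ∈ pvExpand obs visited, q ∉ visited := by
        by_contra h
        push Not at h
        exact hsub ((PySem.Set.issubset_iff _ _).mpr h)
      obtain ⟨q0, hq0m, hq0n⟩ := hnotsub
      have hmemU : ∀ x, x ∈ PySem.Set.union visited (pvExpand obs visited) ↔
          x ∈ visited ∨ x ∈ pvExpand obs visited := by
        intro x; exact PySem.Set.mem_union _ _ x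
      have hnodU : (PySem.Set.union visited (pvExpand obs visited)).Nodup :=
        PySem.Set.nodup_union _ _ hn
      have hgU : ∀ p ∈ PySem.Set.union visited (pvExpand obs visited), pvInGrid p ∨ p = (0, 0) := by
        intro p hp
        rcases (hmemU p).mp hp with hp | hp
        · exact hg p hp
        · exact Or.inl (pvMem_expand.mp hp).choose_spec.2.2.1
      have hgrow : visited.length + 1 ≤ (PySem.Set.union visited (pvExpand obs visited)).length := by
        have hsubq : visited ++ [q0] ⊆ PySem.Set.union visited (pvExpand obs visited) := by
          intro x hx
          rcases List.mem_append.mp hx with hx | hx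
          · exact (hmemU x).mpr (Or.inl hx)
          · simp only [List.mem_singleton] at hx
            subst hx
            exact (hmemU x).mpr (Or.inr hq0m)
        have hnodq : (visited ++ [q0]).Nodup := by
          rw [List.nodup_append]
          refine ⟨hn, List.nodup_singleton _, ?_⟩
          intro a ha b hbm
          rw [List.mem_singleton] at hbm
          subst hbm
          rintro rfl
          exact hq0n ha
        have := (List.subperm_of_subset hnodq hsubq).length_le
        simpa using this
      have hloop : pvIterLoop obs (fuel + 1) visited
          = pvIterLoop obs fuel (PySem.Set.union visited (pvExpand obs visited)) := by
        simp [pvIterLoop, hsub]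
      rw [hloop, ih _ hnodU hgU (by omega)]
      constructor
      · rintro ⟨s, hs, hr⟩
        rcases (hmemU s).mp hs with hs | hs
        · exact ⟨s, hs, hr⟩
        · obtain ⟨p, hp, hedge⟩ := pvMem_expand.mp hs
          exact ⟨p, hp, pvReach_trans (pvReach_single hedge) hr⟩
      · rintro ⟨s, hs, hr⟩
        exact ⟨s, (hmemU s).mpr (Or.inl hs), hr⟩

-- ===== VERDICT (by name: the statement is the Claim_ definition above) =====
theorem is_path_possible_spec : Claim_equal_is_path_possible := by
  intro obstacles _
  unfold Spec_is_path_possible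
  have hA : is_path_possible obstacles = true ↔ pvReach obstacles (0, 0) (5, 5) := by
    unfold is_path_possible
    rw [pvBfsLoop_main obstacles 100 [(0, 0)] [(0, 0)]
      ⟨by simp, by simp, by simp, by simp, by simp⟩ (by simp)]
    simp
  have hB : is_path_possible_alt obstacles = true ↔ pvReach obstacles (0, 0) (5, 5) := by
    unfold is_path_possible_alt
    rw [pvIterLoop_main obstacles 100 (PySem.Set.ofList [(0, 0)])
      (by simp [PySem.Set.ofList]) (by simp [PySem.Set.ofList]) (by simp [PySem.Set.ofList])]
    simp [PySem.Set.ofList]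
  exact Bool.eq_iff_iff.mpr (hA.trans hB.symm)
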